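-- pv_equiv track=rewrite | github.com/code2lrn/EPIJudge | epi_judge_python/enumerate_palindromic_decompositions.py | palindrome_decompositions
-- ===== SOURCE A (Python) =====
-- from typing import List
--
-- def palindrome_decompositions(text: str) -> List[List[str]]:
--     def decompose(next_pos, palindromes):
--         if next_pos == len(text):
--             result.append(palindromes)
--             return
--
--         for i in range(next_pos + 1, len(text) + 1):
--             region = text[next_pos:i]
--             if region == region[::-1]:
--                 decompose(i, palindromes + [region])
--
--     result: List[List[str]] = []
--     decompose(0, [])
--     return result
-- ===== SOURCE B (Python) =====
-- from typing import List
--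
-- def palindrome_decompositions(text: str) -> List[List[str]]:
--     # Bottom-up DP over suffixes: rows[m] holds all palindromic
--     # decompositions of text[i+m:] while processing index i.
--     n = len(text)
--     rows: List[List[List[str]]] = [[[]]]
--     for i in range(n - 1, -1, -1):
--         row: List[List[str]] = []
--         for j in range(i + 1, n + 1):
--             piece = text[i:j]
--             if piece == piece[::-1]:
--                 row.extend([piece] + d for d in rows[j - i - 1])
--         rows = [row] + rows
--     return rows[0]
-- ===== Notes on version B (the rewrite author's own statement) =====
-- stated objective: alternative
-- what changed: Replaced A's top-down recursion carrying a growing prefix accumulator and a shared result list by a bottom-up DP that builds, for each suffix start index from the end of the string to 0, the full list of palindromic decompositions of that suffix from the already-computed rows, returning the row for index 0.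
import Mathlib
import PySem

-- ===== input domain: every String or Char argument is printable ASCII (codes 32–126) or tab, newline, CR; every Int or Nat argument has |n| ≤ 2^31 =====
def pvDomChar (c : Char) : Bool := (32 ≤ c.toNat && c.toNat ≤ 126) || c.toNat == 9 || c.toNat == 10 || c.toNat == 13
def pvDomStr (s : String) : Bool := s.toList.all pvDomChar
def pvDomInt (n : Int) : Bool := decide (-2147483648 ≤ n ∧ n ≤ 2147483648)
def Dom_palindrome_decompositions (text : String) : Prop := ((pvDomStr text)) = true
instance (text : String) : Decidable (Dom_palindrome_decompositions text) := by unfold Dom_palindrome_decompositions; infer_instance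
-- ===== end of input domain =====

-- B replaces A's top-down recursion-with-accumulator by a bottom-up DP table of
-- suffix decompositions (objective: alternative; same asymptotic cost).

-- ===== PORT A =====
-- A's inner 'decompose': returns, in order, the entries A appends to 'result'.
def decomposeA (s : List Char) (next_pos : Nat) (palindromes : List String) :
    List (List String) :=
  if next_pos = s.length then [palindromes]
  else
    (List.range' (next_pos + 1) (s.length - next_pos)).attach.flatMap (fun i =>
      let region := PySem.List.slice s (some (next_pos : Int)) (some ((i.1 : Nat) : Int))
      if some region = PySem.List.slice? region none none (-1) then
        decomposeA s i.1 (palindromes ++ [String.ofList region])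
      else [])
termination_by s.length - next_pos
decreasing_by
  have h := List.mem_range'_1.mp i.2
  omega

def palindrome_decompositions (text : String) : List (List String) :=
  decomposeA text.toList 0 []

-- ===== PORT B =====
-- one row of the DP: all palindromic decompositions of text[i:], given the
-- rows for i+1 … n (head = row for i+1)
def dpRow (s : List Char) (i : Nat) (rows : List (List (List String))) :
    List (List String) :=
  (List.range' (i + 1) (s.length - i)).flatMap (fun j =>
    let piece := PySem.List.slice s (some (i : Int)) (some ((j : Nat) : Int))
    if some piece = PySem.List.slice? piece none none (-1) then
      (rows.getD (j - i - 1) []).map (fun d => String.ofList piece :: d)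
    else [])

-- rows for indices n-k … n, built bottom-up (head = row for n-k)
def buildTable (s : List Char) : Nat → List (List (List String))
  | 0 => [[[]]]
  | k + 1 => dpRow s (s.length - (k + 1)) (buildTable s k) :: buildTable s k

def palindrome_decompositions_alt (text : String) : List (List String) :=
  (buildTable text.toList text.toList.length).headD []

-- ===== PRECONDITION & SPEC =====
def Spec_palindrome_decompositions (text : String) (out : List (List String)) : Prop := out = palindrome_decompositions_alt text
instance (text : String) (out : List (List String)) : Decidable (Spec_palindrome_decompositions text out) := by unfold Spec_palindrome_decompositions; infer_instance

-- ===== CLAIM (what is proved, stated in full; the proofs are below) =====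
def Claim_equal_palindrome_decompositions : Prop := ∀ (text : String), Dom_palindrome_decompositions text → Spec_palindrome_decompositions text (palindrome_decompositions text)

-- ===== LEMMAS AND PROOFS =====
theorem flatMap_attach' {α β : Type} (l : List α) (g : α → List β) :
    l.attach.flatMap (fun x => g x.1) = l.flatMap g := by
  rw [List.flatMap, List.flatMap, show (fun (x : {x // x ∈ l}) => g x.1) = g ∘ Subtype.val from rfl,
    ← List.map_map, List.attach_map_subtype_val]

-- A's accumulator only prefixes each result of the accumulator-free call
theorem decomposeA_acc (k : Nat) (s : List Char) (p : Nat) (hk : s.length - p ≤ k)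
    (acc : List String) :
    decomposeA s p acc = (decomposeA s p []).map (fun d => acc ++ d) := by
  induction k generalizing p acc with
  | zero =>
    rw [decomposeA, decomposeA]
    by_cases hp : p = s.length
    · simp [hp]
    · have h0 : s.length - p = 0 := by omega
      rw [if_neg hp, if_neg hp, h0]
      simp
  | succ k ih =>
    rw [decomposeA, decomposeA]
    by_cases hp : p = s.length
    · simp [hp]
    · rw [if_neg hp, if_neg hp, List.map_flatMap]
      apply List.flatMap_congr
      rintro ⟨i, hi⟩ -
      have hm := List.mem_range'_1.mp hi
      simp only []
      by_cases hpal : some (PySem.List.slice s (some (p : Int)) (some (i : Int))) =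
          PySem.List.slice? (PySem.List.slice s (some (p : Int)) (some (i : Int))) none none (-1)
      · rw [if_pos hpal, if_pos hpal,
          ih i (by omega) (acc ++ [String.ofList (PySem.List.slice s (some (p : Int)) (some (i : Int)))]),
          ih i (by omega) ([] ++ [String.ofList (PySem.List.slice s (some (p : Int)) (some (i : Int)))]),
          List.map_map]
        simp [Function.comp, List.append_assoc]
      · rw [if_neg hpal, if_neg hpal]
        simp

theorem dpRow_eq (s : List Char) (i : Nat) (hi : i < s.length) :
    dpRow s i ((List.range' (i + 1) (s.length - i)).map (fun j => decomposeA s j [])) =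
      decomposeA s i [] := by
  rw [dpRow, decomposeA, if_neg (by omega), ← flatMap_attach']
  apply List.flatMap_congr
  rintro ⟨j, hj⟩ -
  have hm := List.mem_range'_1.mp hj
  simp only []
  by_cases hpal : some (PySem.List.slice s (some (i : Int)) (some (j : Int))) =
      PySem.List.slice? (PySem.List.slice s (some (i : Int)) (some (j : Int))) none none (-1)
  · rw [if_pos hpal, if_pos hpal]
    have hget : ((List.range' (i + 1) (s.length - i)).map
        (fun j => decomposeA s j [])).getD (j - i - 1) [] = decomposeA s j [] := by
      have hlen : j - i - 1 < (List.range' (i + 1) (s.length - i)).length := by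
        simp only [List.length_range']
        omega
      rw [List.getD_eq_getElem _ _ (by simpa using hlen)]
      simp only [List.getElem_map, List.getElem_range']
      congr 1
      omega
    rw [hget,
      decomposeA_acc s.length s j (by omega) ([] ++ [String.ofList (PySem.List.slice s (some (i : Int)) (some (j : Int)))])]
    simp
  · rw [if_neg hpal, if_neg hpal]

theorem buildTable_eq (s : List Char) :
    ∀ (k : Nat), k ≤ s.length → buildTable s k =
      (List.range' (s.length - k) (k + 1)).map (fun i => decomposeA s i []) := by
  intro k
  induction k with
  | zero =>
    intro _
    rw [buildTable]
    have hbase : decomposeA s s.length [] = [[]] := by rw [decomposeA]; simp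
    simp [hbase]
  | succ k ih =>
    intro hk
    have hk1 : k ≤ s.length := by omega
    rw [buildTable, ih hk1]
    have hr : List.range' (s.length - (k + 1)) (k + 1 + 1) =
        (s.length - (k + 1)) :: List.range' (s.length - k) (k + 1) := by
      rw [List.range'_succ, show s.length - (k + 1) + 1 = s.length - k from by omega]
    rw [hr, List.map_cons]
    congr 1
    have hd := dpRow_eq s (s.length - (k + 1)) (by omega)
    rw [show s.length - (k + 1) + 1 = s.length - k from by omega,
      show s.length - (s.length - (k + 1)) = k + 1 from by omega] at hd
    exact hd

-- ===== VERDICT (by name: the statement is the Claim_ definition above) =====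
theorem palindrome_decompositions_spec : Claim_equal_palindrome_decompositions := by
  intro text _
  unfold Spec_palindrome_decompositions palindrome_decompositions palindrome_decompositions_alt
  rw [buildTable_eq _ _ (le_refl _), Nat.sub_self, List.range'_succ, List.map_cons,
    List.headD_cons]
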